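-- pv_equiv track=rewrite | github.com/romanovamar/bio-python-2 | translate.py | to_be_multiple_3
-- ===== SOURCE A (Python) =====
-- def frame(seq):
--     # moving frame to 3 nucleotides, the same for reverse
--
--     reverse_seq = seq[::-1]
--     list = []
--     for i in range(3):
--         list.append(seq)
--         seq = seq[1:]
--         list.append(reverse_seq)
--         reverse_seq = reverse_seq[1:]
--     return list
--
-- def to_be_multiple_3(seq):
--     # Adding N to make seq divisible by 3
--
--     list = frame(seq)
--     frame_list = []
--     for f in list:
--         if len(f) % 3 == 0:
--             frame_list.append(f)
--         elif len(f) % 3 == 1: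
--             f = f + 'NN'
--             frame_list.append(f)
--         else:
--             f = f + 'N'
--             frame_list.append(f)
--     return frame_list
-- ===== SOURCE B (Python) =====
-- def to_be_multiple_3(seq):
--     # Build the result back-to-front from offset 2 down to 0, padding each frame
--     # by over-extending with two pad characters and truncating to the largest multiple of 3.
--     rev = seq[::-1]
--
--     def padded(s):
--         t = s + 'NN'
--         return t[:len(t) - len(t) % 3]
--
--     out = []
--     for i in (2, 1, 0):
--         out = [padded(seq[i:]), padded(rev[i:])] + out
--     return out
-- ===== Notes on version B (the rewrite author's own statement) =====
-- stated objective: alternative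
-- what changed: Replaced the frame-builder-then-classify pipeline (three-way mod branch appending one or two pad characters) by a back-to-front construction that prepends frame pairs for offsets 2,1,0 and pads by truncation: over-extend each frame with two pad characters and cut to the largest multiple of 3, so no mod-case branch or pad-length arithmetic on the original length is needed.
import Mathlib
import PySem

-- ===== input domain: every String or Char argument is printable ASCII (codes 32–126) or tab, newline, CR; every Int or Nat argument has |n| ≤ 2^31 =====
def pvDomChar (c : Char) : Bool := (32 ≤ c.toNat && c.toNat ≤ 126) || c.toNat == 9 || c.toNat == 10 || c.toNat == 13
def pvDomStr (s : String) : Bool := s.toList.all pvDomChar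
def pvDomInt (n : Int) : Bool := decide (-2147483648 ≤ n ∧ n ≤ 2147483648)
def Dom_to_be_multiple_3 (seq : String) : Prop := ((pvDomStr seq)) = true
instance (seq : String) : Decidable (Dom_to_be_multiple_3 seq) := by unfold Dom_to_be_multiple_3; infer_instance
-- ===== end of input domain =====

-- B builds the list back-to-front (offsets 2,1,0) and pads by over-extending with two pad characters then truncating, instead of A's frame-builder stage plus three-way mod branch; alternative decomposition, same cost. Return-value equivalence (neither mutates).

-- ===== PORT A =====
-- helper 'frame' of A: builds the 6 reading frames; seq[::-1] is reverse, seq[1:] is slice (some 1) none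
def pvFrame (s : List Char) : List (List Char) :=
  (PySem.List.pyRange 0 3 1).foldl
    (fun (st : List Char × List Char × List (List Char)) _ =>
      (PySem.List.slice st.1 (some 1) none,
       PySem.List.slice st.2.1 (some 1) none,
       st.2.2 ++ [st.1] ++ [st.2.1]))
    (s, s.reverse, []) |>.2.2

def to_be_multiple_3 (seq : String) : List String :=
  ((pvFrame seq.toList).foldl
    (fun acc f =>
      if f.length % 3 == 0 then acc ++ [f]
      else if f.length % 3 == 1 then acc ++ [f ++ ['N', 'N']]
      else acc ++ [f ++ ['N']])
    []).map String.ofList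

-- ===== PORT B =====
-- padded(s): over-extend by two pad chars, then truncate t[:len(t) - len(t) % 3]; Python '%' on a nonneg int via PySem.Int.mod
def pvPadded (s : List Char) : List Char :=
  let t := s ++ ['N', 'N']
  PySem.List.slice t none (some ((t.length : Int) - PySem.Int.mod (t.length : Int) 3))

def to_be_multiple_3_alt (seq : String) : List String :=
  let s := seq.toList
  let rev := s.reverse
  (([2, 1, 0] : List Int).foldl
    (fun out i =>
      [pvPadded (PySem.List.slice s (some i) none),
       pvPadded (PySem.List.slice rev (some i) none)] ++ out)
    []).map String.ofList

-- ===== PRECONDITION & SPEC =====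
def Spec_to_be_multiple_3 (seq : String) (out : List String) : Prop := out = to_be_multiple_3_alt seq
instance (seq : String) (out : List String) : Decidable (Spec_to_be_multiple_3 seq out) := by unfold Spec_to_be_multiple_3; infer_instance

-- ===== CLAIM =====
def Claim_equal_to_be_multiple_3 : Prop := ∀ (seq : String), Dom_to_be_multiple_3 seq → Spec_to_be_multiple_3 seq (to_be_multiple_3 seq)

-- ===== LEMMAS AND PROOFS =====

lemma pvPadded_val (f : List Char) :
    pvPadded f
    = if f.length % 3 == 0 then f else if f.length % 3 == 1 then f ++ ['N', 'N'] else f ++ ['N'] := by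
  unfold pvPadded
  dsimp only
  rw [PySem.Int.mod_eq_emod_of_pos (by norm_num)]
  have hlen : (f ++ ['N', 'N']).length = f.length + 2 := by simp
  rw [hlen]
  rcases (by omega : f.length % 3 = 0 ∨ f.length % 3 = 1 ∨ f.length % 3 = 2) with h | h | h
  · have hb : ((f.length + 2 : Nat) : Int) - ((f.length + 2 : Nat) : Int) % 3
        = ((f.length : Nat) : Int) := by push_cast; omega
    rw [hb, PySem.List.slice_to_natCast]
    simp [h]
  · have hb : ((f.length + 2 : Nat) : Int) - ((f.length + 2 : Nat) : Int) % 3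
        = ((f.length + 2 : Nat) : Int) := by push_cast; omega
    rw [hb, PySem.List.slice_to_natCast]
    simp [h, List.take_append]
  · have hb : ((f.length + 2 : Nat) : Int) - ((f.length + 2 : Nat) : Int) % 3
        = ((f.length + 1 : Nat) : Int) := by push_cast; omega
    rw [hb, PySem.List.slice_to_natCast]
    simp [h, List.take_append]

lemma pvStep_eq (acc : List (List Char)) (f : List Char) :
    (if f.length % 3 == 0 then acc ++ [f]
     else if f.length % 3 == 1 then acc ++ [f ++ ['N', 'N']]
     else acc ++ [f ++ ['N']])
    = acc ++ [pvPadded f] := by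
  rw [pvPadded_val]; split_ifs <;> rfl

lemma pvStep0_eq (f : List Char) :
    (if f.length % 3 == 0 then [f]
     else if f.length % 3 == 1 then [f ++ ['N', 'N']]
     else [f ++ ['N']])
    = [pvPadded f] := by
  rw [pvPadded_val]; split_ifs <;> rfl

lemma pvRange3 : PySem.List.pyRange 0 3 1 = [0, 1, 2] := by decide

lemma slice_two (s : List Char) : PySem.List.slice s (some 2) none = s.tail.tail := by
  rw [show (2 : Int) = ((2 : Nat) : Int) by norm_num, PySem.List.slice_from_natCast]
  cases s with
  | nil => rfl
  | cons a t => cases t <;> rfl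

-- ===== VERDICT =====
theorem to_be_multiple_3_spec : Claim_equal_to_be_multiple_3 := by
  intro seq _
  unfold Spec_to_be_multiple_3 to_be_multiple_3 to_be_multiple_3_alt pvFrame
  rw [pvRange3]
  simp only [List.foldl_cons, List.foldl_nil, List.nil_append, List.cons_append,
    PySem.List.slice_from_one, PySem.List.slice_zero_start, PySem.List.slice_none_none, slice_two]
  rw [pvStep_eq, pvStep_eq, pvStep_eq, pvStep_eq, pvStep_eq, pvStep0_eq]
  simp
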